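-- pv_equiv track=rewrite | github.com/joelshore4747/edge-har-fall-detection | services/placement_state.py | _bridge_short_runs
-- ===== SOURCE A (Python) =====
-- def _bridge_short_runs(labels: list[str], max_run_length: int) -> list[str]:
--     if not labels or max_run_length <= 0:
--         return labels
--
--     out = list(labels)
--     n = len(out)
--     i = 0
--
--     while i < n:
--         j = i + 1
--         while j < n and out[j] == out[i]:
--             j += 1
--
--         run_len = j - i
--         prev_label = out[i - 1] if i > 0 else None
--         next_label = out[j] if j < n else None
--
--         if (
--                 run_len <= max_run_length
--                 and prev_label is not None
--                 and next_label is not None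
--                 and prev_label == next_label
--         ):
--             for k in range(i, j):
--                 out[k] = prev_label
--
--         i = j
--
--     return out
-- ===== SOURCE B (Python) =====
-- def _runs(labels):
--     # run-length table: one (label, count) per maximal run of equal labels
--     runs = []
--     i = 0
--     n = len(labels)
--     while i < n:
--         j = i + 1
--         while j < n and labels[j] == labels[i]:
--             j += 1
--         runs.append((labels[i], j - i))
--         i = j
--     return runs
--
--
-- def _bridge_short_runs(labels: list[str], max_run_length: int) -> list[str]:
--     if not labels or max_run_length <= 0:
--         return labels
--     runs = _runs(labels)
--     out = []
--     prev_eff = None  # label the previous run holds AFTER any bridging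
--     for idx, (lab, cnt) in enumerate(runs):
--         nxt = runs[idx + 1][0] if idx + 1 < len(runs) else None
--         if prev_eff is not None and nxt is not None and cnt <= max_run_length and prev_eff == nxt:
--             eff = prev_eff
--         else:
--             eff = lab
--         out.extend([eff] * cnt)
--         prev_eff = eff
--     return out
-- ===== Notes on version B (the rewrite author's own statement) =====
-- stated objective: alternative
-- what changed: B first builds a run-length table of maximal equal-label runs, then in a second pass over runs (threading the previous run's post-bridging label) rebuilds a fresh output list, instead of A's single in-place index-walking while-loop that mutates the copied list segment by segment.
import Mathlib
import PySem

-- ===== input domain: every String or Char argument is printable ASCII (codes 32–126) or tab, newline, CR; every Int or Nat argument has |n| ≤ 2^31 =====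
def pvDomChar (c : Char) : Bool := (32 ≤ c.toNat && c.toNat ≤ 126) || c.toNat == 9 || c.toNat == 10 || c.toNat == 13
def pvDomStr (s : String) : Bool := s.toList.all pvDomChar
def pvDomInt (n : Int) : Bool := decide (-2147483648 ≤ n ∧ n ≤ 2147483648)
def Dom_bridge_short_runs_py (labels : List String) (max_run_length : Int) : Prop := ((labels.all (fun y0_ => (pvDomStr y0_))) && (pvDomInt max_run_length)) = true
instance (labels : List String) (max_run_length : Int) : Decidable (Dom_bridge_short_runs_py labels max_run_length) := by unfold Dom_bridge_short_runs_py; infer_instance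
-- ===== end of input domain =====

-- B rebuilds the output from a run-length table in two passes instead of A's in-place index
-- mutation (objective: alternative decomposition, same cost; return-value equivalence).

-- ===== PORT A =====
-- inner `while j < n and out[j] == out[i]` loop; indices are always in range, so
-- `getD _ ""` is exact for Python's `out[j]`.
def aRunEnd (out : List String) (n : Nat) (v : String) (j : Nat) : Nat :=
  if h : j < n ∧ out.getD j "" = v then aRunEnd out n v (j + 1) else j
termination_by n - j
decreasing_by omega

theorem aRunEnd_ge (out : List String) (n : Nat) (v : String) (j : Nat) :
    j ≤ aRunEnd out n v j := by
  rw [aRunEnd]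
  split
  next h =>
    have := aRunEnd_ge out n v (j + 1)
    omega
  next => omega
termination_by n - j
decreasing_by omega

-- `for k in range(i, j): out[k] = p` (in-range list assignment = List.set)
def aFill (out : List String) (i j : Nat) (p : String) : List String :=
  (List.range' i (j - i)).foldl (fun o k => o.set k p) out

-- the outer `while i < n` loop of A
def aLoop (mr : Int) (n : Nat) (out : List String) (i : Nat) : List String :=
  if hi : i < n then
    let j := aRunEnd out n (out.getD i "") (i + 1)
    aLoop mr n
      (if ((j - i : Nat) : Int) ≤ mr ∧ 0 < i ∧ j < n ∧ out.getD (i - 1) "" = out.getD j ""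
        then aFill out i j (out.getD (i - 1) "")
        else out)
      j
  else out
termination_by n - i
decreasing_by
  have := aRunEnd_ge out n (out.getD i "") (i + 1)
  omega

def bridge_short_runs_py (labels : List String) (max_run_length : Int) : List String :=
  if labels = [] ∨ max_run_length ≤ 0 then labels
  else aLoop max_run_length labels.length labels 0

-- ===== PORT B =====
-- `while k < len(labels) and labels[k] == head` of B's _runs, on the remaining suffix
def runCount (v : String) : List String → Nat
  | [] => 0
  | x :: xs => if x = v then runCount v xs + 1 else 0

-- B's _runs: run-length table of maximal equal runs
def runsOf : List String → List (String × Nat)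
  | [] => []
  | x :: xs =>
    (x, runCount x xs + 1) :: runsOf (xs.drop (runCount x xs))
termination_by l => l.length
decreasing_by simp

-- B's second pass over the run table, threading prev_eff
def bLoop (mr : Int) (prev : Option String) : List (String × Nat) → List String
  | [] => []
  | (lab, cnt) :: rest =>
    let nxt : Option String := rest.head?.map Prod.fst
    let eff : String :=
      match prev, nxt with
      | some p, some q => if (cnt : Int) ≤ mr ∧ p = q then p else lab
      | _, _ => lab
    List.replicate cnt eff ++ bLoop mr (some eff) rest

def bridge_short_runs_py_alt (labels : List String) (max_run_length : Int) : List String :=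
  if labels = [] ∨ max_run_length ≤ 0 then labels
  else bLoop max_run_length none (runsOf labels)

-- ===== PRECONDITION & SPEC =====
def Spec_bridge_short_runs_py (labels : List String) (max_run_length : Int) (out : List String) : Prop := out = bridge_short_runs_py_alt labels max_run_length
instance (labels : List String) (max_run_length : Int) (out : List String) : Decidable (Spec_bridge_short_runs_py labels max_run_length out) := by unfold Spec_bridge_short_runs_py; infer_instance

-- ===== CLAIM (what is proved, stated in full; the proofs are below) =====
def Claim_equal_bridge_short_runs_py : Prop := ∀ (labels : List String) (max_run_length : Int), Dom_bridge_short_runs_py labels max_run_length → Spec_bridge_short_runs_py labels max_run_length (bridge_short_runs_py labels max_run_length)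

-- ===== LEMMAS AND PROOFS =====

lemma runCount_le (x : String) (xs : List String) : runCount x xs ≤ xs.length := by
  induction xs with
  | nil => simp [runCount]
  | cons y ys ih =>
    simp only [runCount, List.length_cons]
    split <;> omega

lemma runCount_take (x : String) (xs : List String) :
    xs.take (runCount x xs) = List.replicate (runCount x xs) x := by
  induction xs with
  | nil => simp [runCount]
  | cons y ys ih =>
    simp only [runCount]
    split
    next h => simp [List.replicate_succ, h, ih]
    next => simp

lemma cons_split (x : String) (xs : List String) :
    x :: xs = List.replicate (runCount x xs + 1) x ++ xs.drop (runCount x xs) := by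
  conv_lhs => rw [← List.take_append_drop (runCount x xs) xs]
  rw [runCount_take]
  simp [List.replicate_succ]

lemma runsOf_head (l : List String) : (runsOf l).head?.map Prod.fst = l.head? := by
  cases l with
  | nil => rw [runsOf.eq_1]; rfl
  | cons x xs => rw [runsOf.eq_2]; rfl

lemma getLast?_append_replicate (pre : List String) (k : Nat) (p : String) :
    (pre ++ List.replicate (k + 1) p).getLast? = some p := by
  rw [List.getLast?_append]
  have h : (List.replicate (k + 1) p).getLast? = some p := by
    induction k with
    | zero => simp
    | succ m ih => rw [List.replicate_succ, List.getLast?_cons, ih]; simp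
  simp [h]

lemma getD_append_mid (pre rest : List String) :
    (pre ++ rest).getD pre.length "" = rest.head?.getD "" := by
  rw [List.getD_eq_getElem?_getD, List.getElem?_append_right (Nat.le_refl _)]
  cases rest <;> simp

lemma getD_last (pre rest : List String) (h : pre ≠ []) :
    (pre ++ rest).getD (pre.length - 1) "" = pre.getLast?.getD "" := by
  have hlen : 0 < pre.length := List.length_pos_iff.mpr h
  rw [List.getD_eq_getElem?_getD, List.getElem?_append_left (by omega), List.getLast?_eq_getElem?]

lemma aRunEnd_eq (out : List String) (n : Nat) (v : String) (j : Nat)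
    (hn : out.length = n) (hj : j ≤ n) :
    aRunEnd out n v j = j + runCount v (out.drop j) := by
  rw [aRunEnd]
  split
  next h =>
    have hjn : j < out.length := by omega
    have hdrop : out.drop j = out[j] :: out.drop (j + 1) := List.drop_eq_getElem_cons hjn
    have hv : out[j] = v := by
      have := h.2
      rwa [List.getD_eq_getElem?_getD, List.getElem?_eq_getElem hjn] at this
    rw [aRunEnd_eq out n v (j + 1) hn (by omega), hdrop, hv]
    simp [runCount]
    omega
  next h =>
    by_cases hjn : j < n
    · have hjl : j < out.length := by omega
      have hdrop : out.drop j = out[j] :: out.drop (j + 1) := List.drop_eq_getElem_cons hjl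
      have hv : out[j] ≠ v := by
        intro hc
        exact h ⟨hjn, by rw [List.getD_eq_getElem?_getD, List.getElem?_eq_getElem hjl]; simpa⟩
      rw [hdrop]
      simp [runCount, hv]
    · have : j = n := by omega
      rw [this, ← hn, List.drop_length]
      simp [runCount]
termination_by n - j
decreasing_by omega

lemma fill_foldl (p : String) (c : Nat) : ∀ (pre rest : List String), c ≤ rest.length →
    (List.range' pre.length c).foldl (fun o k => o.set k p) (pre ++ rest)
      = pre ++ List.replicate c p ++ rest.drop c := by
  induction c with
  | zero => intro pre rest _; simp
  | succ m ih =>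
    intro pre rest hc
    match rest with
    | r :: rs =>
      rw [List.range'_succ]
      simp only [List.foldl_cons]
      have hset : (pre ++ r :: rs).set pre.length p = (pre ++ [p]) ++ rs := by
        rw [List.set_append_right _ _ (Nat.le_refl _)]
        simp
      rw [hset]
      have hlen : (pre ++ [p]).length = pre.length + 1 := by simp
      rw [← hlen, ih (pre ++ [p]) rs (by simpa using hc)]
      simp [List.replicate_succ]

lemma aFill_eq (pre rest : List String) (c : Nat) (p : String) (hc : c ≤ rest.length) :
    aFill (pre ++ rest) pre.length (pre.length + c) p
      = pre ++ List.replicate c p ++ rest.drop c := by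
  unfold aFill
  have h : pre.length + c - pre.length = c := by omega
  rw [h, fill_foldl p c pre rest hc]

lemma main_loop (mr : Int) (N : Nat) : ∀ (rest pre : List String), rest.length ≤ N →
    aLoop mr (pre.length + rest.length) (pre ++ rest) pre.length
      = pre ++ bLoop mr pre.getLast? (runsOf rest) := by
  induction N with
  | zero =>
    intro rest pre h
    have hr : rest = [] := by
      cases rest with
      | nil => rfl
      | cons a l => simp at h
    subst hr
    rw [aLoop]
    rw [dif_neg (by simp)]
    rw [runsOf.eq_1]
    simp [bLoop]
  | succ N ih =>
    intro rest pre h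
    match rest with
    | [] =>
      rw [aLoop]
      rw [dif_neg (by simp)]
      rw [runsOf.eq_1]
      simp [bLoop]
    | x :: xs =>
      obtain ⟨k, hk⟩ : ∃ k, runCount x xs = k := ⟨_, rfl⟩
      obtain ⟨tail, htail⟩ : ∃ t, xs.drop k = t := ⟨_, rfl⟩
      have hkle : k ≤ xs.length := hk ▸ runCount_le x xs
      have hsplit : x :: xs = List.replicate (k + 1) x ++ tail := by
        rw [← htail, ← hk]; exact cons_split x xs
      have htl : tail.length = xs.length - k := by rw [← htail]; simp
      have hrun : runsOf (x :: xs) = (x, k + 1) :: runsOf tail := by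
        rw [runsOf.eq_2, hk, htail]
      have hgi : (pre ++ x :: xs).getD pre.length "" = x := by
        rw [getD_append_mid]; rfl
      have hdrop1 : (pre ++ x :: xs).drop (pre.length + 1) = xs := by
        have h1 : pre ++ x :: xs = (pre ++ [x]) ++ xs := by simp
        have h2 : (pre ++ [x]).length = pre.length + 1 := by simp
        rw [h1, ← h2, List.drop_left]
      have hj : aRunEnd (pre ++ x :: xs) (pre.length + (x :: xs).length)
          ((pre ++ x :: xs).getD pre.length "") (pre.length + 1) = pre.length + 1 + k := by
        rw [hgi, aRunEnd_eq _ _ _ _ (by simp) (by simp only [List.length_cons]; omega),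
          hdrop1, hk]
      have hgj : (pre ++ x :: xs).getD (pre.length + 1 + k) "" = tail.head?.getD "" := by
        have hre : pre ++ x :: xs = (pre ++ List.replicate (k + 1) x) ++ tail := by
          rw [hsplit]; simp
        have hl : (pre ++ List.replicate (k + 1) x).length = pre.length + 1 + k := by
          simp; omega
        rw [hre, ← hl, getD_append_mid]
      have hlens : (x :: xs).length = k + 1 + tail.length := by
        have := congrArg List.length hsplit
        simpa using this
      rw [aLoop]
      rw [dif_pos (by simp only [List.length_cons]; omega :
        pre.length < pre.length + (x :: xs).length)]
      simp only [hj]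
      by_cases hC : ((pre.length + 1 + k - pre.length : Nat) : Int) ≤ mr ∧ 0 < pre.length ∧
          pre.length + 1 + k < pre.length + (x :: xs).length ∧
          (pre ++ x :: xs).getD (pre.length - 1) "" = (pre ++ x :: xs).getD (pre.length + 1 + k) ""
      · -- bridged run: pre nonempty, tail nonempty, prev effective label = next label
        obtain ⟨hmr, hpre0, hjn, heq⟩ := hC
        have hprene : pre ≠ [] := by
          intro hc; subst hc; simp at hpre0
        obtain ⟨pl, hpl⟩ : ∃ pl, pre.getLast? = some pl := by
          cases hple : pre.getLast? with
          | none => exact absurd (List.getLast?_eq_none_iff.mp hple) hprene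
          | some a => exact ⟨a, rfl⟩
        have hklt : k < xs.length := by
          simp only [List.length_cons] at hjn; omega
        obtain ⟨q, ts, hq⟩ : ∃ q ts, tail = q :: ts := by
          cases htc : tail with
          | nil => rw [htc] at htl; simp at htl; omega
          | cons a l => exact ⟨a, l, rfl⟩
        have hprev : (pre ++ x :: xs).getD (pre.length - 1) "" = pl := by
          rw [getD_last _ _ hprene, hpl]; rfl
        have hnext : (pre ++ x :: xs).getD (pre.length + 1 + k) "" = q := by
          rw [hgj, hq]; rfl
        have hplq : pl = q := by rw [hprev, hnext] at heq; exact heq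
        rw [if_pos ⟨hmr, hpre0, hjn, heq⟩, hprev]
        have hfill : aFill (pre ++ x :: xs) pre.length (pre.length + 1 + k) pl
            = (pre ++ List.replicate (k + 1) pl) ++ tail := by
          have h1 : pre.length + 1 + k = pre.length + (k + 1) := by omega
          have h2 : (x :: xs).drop (k + 1) = tail := by
            rw [List.drop_succ_cons, htail]
          rw [h1, aFill_eq pre (x :: xs) (k + 1) pl (by simp only [List.length_cons]; omega), h2]
        rw [hfill]
        have IH := ih tail (pre ++ List.replicate (k + 1) pl) (by omega)
        have hlp : (pre ++ List.replicate (k + 1) pl).length = pre.length + 1 + k := by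
          simp; omega
        rw [hlp, getLast?_append_replicate] at IH
        have hnn : pre.length + 1 + k + tail.length = pre.length + (x :: xs).length := by
          rw [hlens]; omega
        rw [hnn] at IH
        rw [IH, hrun, hpl]
        simp only [bLoop, runsOf_head, hq, List.head?_cons]
        have hcnt : ((k + 1 : Nat) : Int) ≤ mr := by
          have he : (pre.length + 1 + k - pre.length : Nat) = k + 1 := by omega
          rwa [he] at hmr
        rw [if_pos ⟨hcnt, hplq⟩]
        simp
      · -- not bridged: the run keeps its own label x
        rw [if_neg hC]
        have hre : pre ++ x :: xs = (pre ++ List.replicate (k + 1) x) ++ tail := by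
          rw [hsplit]; simp
        rw [hre]
        have IH := ih tail (pre ++ List.replicate (k + 1) x) (by omega)
        have hlp : (pre ++ List.replicate (k + 1) x).length = pre.length + 1 + k := by
          simp; omega
        rw [hlp, getLast?_append_replicate] at IH
        have hnn : pre.length + 1 + k + tail.length = pre.length + (x :: xs).length := by
          rw [hlens]; omega
        rw [hnn] at IH
        rw [IH, hrun]
        simp only [bLoop, runsOf_head]
        have heff : (match pre.getLast?, tail.head? with
            | some p, some q => if ((k + 1 : Nat) : Int) ≤ mr ∧ p = q then p else x
            | _, _ => x) = x := by
          cases hple : pre.getLast? with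
          | none => rfl
          | some pl =>
            cases htc : tail.head? with
            | none => rfl
            | some q =>
              have hprene : pre ≠ [] := by
                intro hc; subst hc; simp at hple
              have hpre0 : 0 < pre.length := List.length_pos_iff.mpr hprene
              have htne : tail ≠ [] := by
                intro hc; rw [hc] at htc; simp at htc
              have htp : 0 < tail.length := List.length_pos_iff.mpr htne
              have hklt : k < xs.length := by omega
              show (if ((k + 1 : Nat) : Int) ≤ mr ∧ pl = q then pl else x) = x
              rw [if_neg]
              rintro ⟨h1, h2⟩
              apply hC
              refine ⟨?_, hpre0, by simp only [List.length_cons]; omega, ?_⟩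
              · have he : (pre.length + 1 + k - pre.length : Nat) = k + 1 := by omega
                rw [he]; exact h1
              · rw [getD_last _ _ hprene, hple, hgj, htc, h2]
        rw [heff]
        simp

-- ===== VERDICT (by name: the statement is the Claim_ definition above) =====
theorem bridge_short_runs_py_spec : Claim_equal_bridge_short_runs_py := by
  intro labels mr _
  unfold Spec_bridge_short_runs_py bridge_short_runs_py bridge_short_runs_py_alt
  split
  · rfl
  · have := main_loop mr labels.length labels [] (Nat.le_refl _)
    simpa using this
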